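-- pv_equiv track=rewrite | github.com/shuozh/resLF | func_input.py | uv_list_by_n
-- ===== SOURCE A (Python) =====
-- def uv_list_by_n(view_n):
--     """
--     caculate view index of each task
--     :param view_n:
--     :return: dictionary of tasks
--     """
--     range_list = []
--     for item in range(view_n // 2):
--         range_list.append([(item ** 2) * 2, view_n - 2 * item])
--     uv_dic = {}
--     for item in range(3, view_n + 1, 2):
--         if item == 3:  # in the corner or border
--             uv_dic['u3h'] = []
--             uv_dic['v3h'] = []
--             uv_dic['u3v'] = []
--             uv_dic['v3v'] = []
--             uv_dic['u3hv'] = []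
--             uv_dic['v3hv'] = []
--
--         uv_dic['u' + str(item)] = []
--         uv_dic['v' + str(item)] = []
--
--     """
--     distance matrix ( 7 * 7 )
--     each task has different range of distance to central
--     distance = (view_n_central - i) ** 2 + (view_n_central - j) ** 2
--     18	13	10	9	10	13	18
--     13	8	5	4	5	8	13
--     10	5	2	1	2	5	10
--     9	4	1	0	1	4	9
--     10	5	2	1	2	5	10
--     13	8	5	4	5	8	13
--     18	13	10	9	10	13	18
--     """
--     view_n_central = view_n // 2
--     for i in range(view_n):
--         for j in range(view_n):
--             if i in [0, view_n - 1] and j in [0, view_n - 1]: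
--                 uv_dic['u3hv'].append(i)
--                 uv_dic['v3hv'].append(j)
--             elif i not in [0, view_n - 1] and j in [0, view_n - 1]:
--                 uv_dic['u3h'].append(i)
--                 uv_dic['v3h'].append(j)
--             elif i in [0, view_n - 1] and j not in [0, view_n - 1]:
--                 uv_dic['u3v'].append(i)
--                 uv_dic['v3v'].append(j)
--             else:
--                 distance = (view_n_central - i) ** 2 + (view_n_central - j) ** 2
--                 for item in range_list:
--                     if distance <= item[0]:
--                         uv_dic['u' + str(item[1])].append(i)
--                         uv_dic['v' + str(item[1])].append(j)
--                         break
--     return uv_dic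
-- ===== SOURCE B (Python) =====
-- def uv_list_by_n(view_n):
--     """
--     caculate view index of each task
--     :param view_n:
--     :return: dictionary of tasks
--     """
--     if view_n < 3:
--         return {}
--     n1 = view_n - 1
--     inner = range(1, n1)
--     uv_dic = {
--         'u3h': [i for i in inner for _ in (0, n1)],
--         'v3h': [j for _ in inner for j in (0, n1)],
--         'u3v': [i for i in (0, n1) for _ in inner],
--         'v3v': [j for _ in (0, n1) for j in inner],
--         'u3hv': [i for i in (0, n1) for _ in (0, n1)],
--         'v3hv': [j for _ in (0, n1) for j in (0, n1)],
--     }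
--     central = view_n // 2
--     for item in range(view_n // 2 - 1, -1, -1):
--         lo = 2 * (item - 1) ** 2 if item > 0 else -1
--         hi = 2 * item ** 2
--         cells = [(i, j) for i in inner for j in inner
--                  if lo < (central - i) ** 2 + (central - j) ** 2 <= hi]
--         uv_dic['u' + str(view_n - 2 * item)] = [c[0] for c in cells]
--         uv_dic['v' + str(view_n - 2 * item)] = [c[1] for c in cells]
--     return uv_dic
-- ===== Notes on version B (the rewrite author's own statement) =====
-- stated objective: alternative
-- what changed: Instead of scanning every grid cell and linearly searching the threshold list per cell, B builds each dictionary entry wholesale: the six border lists come from closed-form comprehensions over the border/interior index ranges, and each interior bucket's list is produced by one per-bucket comprehension selecting the cells whose squared distance lies in that bucket's half-open interval (2*(m-1)^2, 2*m^2].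
import Mathlib
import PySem

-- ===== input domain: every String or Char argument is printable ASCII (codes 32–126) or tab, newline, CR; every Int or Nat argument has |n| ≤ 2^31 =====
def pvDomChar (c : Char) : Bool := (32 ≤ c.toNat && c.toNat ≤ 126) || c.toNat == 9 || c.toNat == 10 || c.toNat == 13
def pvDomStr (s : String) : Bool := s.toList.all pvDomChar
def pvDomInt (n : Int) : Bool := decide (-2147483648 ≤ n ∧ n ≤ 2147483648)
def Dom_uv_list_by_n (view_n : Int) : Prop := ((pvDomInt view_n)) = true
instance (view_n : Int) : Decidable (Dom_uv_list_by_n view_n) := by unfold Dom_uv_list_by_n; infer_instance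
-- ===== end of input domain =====

-- B builds each dictionary list wholesale (border comprehensions + one per-bucket interval comprehension)
-- instead of A's per-cell linear scan of the threshold list; equal return value on all of Pre_.

-- ===== PORT A =====

-- the inner 'for item in range_list: if distance <= item[0]: … break' loop of A
def pvScanA (d : Int) : List (Int × Int) → Option Int
  | [] => none
  | p :: rest => if d ≤ p.1 then some p.2 else pvScanA d rest

-- one iteration of A's grid double loop body (the cell (i, j))
def pvCellStep (view_n central : Int) (range_list : List (Int × Int))
    (dic : PySem.Dict String (List Int)) (i j : Int) : PySem.Dict String (List Int) :=
  if (i = 0 ∨ i = view_n - 1) ∧ (j = 0 ∨ j = view_n - 1) then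
    (dic.modify "u3hv" [] (fun x => x ++ [i])).modify "v3hv" [] (fun x => x ++ [j])
  else if (¬(i = 0 ∨ i = view_n - 1)) ∧ (j = 0 ∨ j = view_n - 1) then
    (dic.modify "u3h" [] (fun x => x ++ [i])).modify "v3h" [] (fun x => x ++ [j])
  else if (i = 0 ∨ i = view_n - 1) ∧ (¬(j = 0 ∨ j = view_n - 1)) then
    (dic.modify "u3v" [] (fun x => x ++ [i])).modify "v3v" [] (fun x => x ++ [j])
  else
    match pvScanA ((central - i)^2 + (central - j)^2) range_list with
    | some lbl =>
        (dic.modify ("u" ++ PySem.Int.toStr lbl) [] (fun x => x ++ [i])).modify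
          ("v" ++ PySem.Int.toStr lbl) [] (fun x => x ++ [j])
    | none => dic

def uv_list_by_n (view_n : Int) : List (String × List Int) :=
  let range_list : List (Int × Int) :=
    (PySem.List.pyRange 0 (PySem.Int.floordiv view_n 2) 1).foldl
      (fun acc item => acc ++ [(item ^ 2 * 2, view_n - 2 * item)]) []
  let uv_dic : PySem.Dict String (List Int) :=
    (PySem.List.pyRange 3 (view_n + 1) 2).foldl
      (fun d item =>
        let d := if item = 3 then
            (((((d.insert "u3h" []).insert "v3h" []).insert "u3v" []).insert "v3v"
                []).insert "u3hv" []).insert "v3hv" []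
          else d
        (d.insert ("u" ++ PySem.Int.toStr item) []).insert ("v" ++ PySem.Int.toStr item) [])
      PySem.Dict.empty
  let central := PySem.Int.floordiv view_n 2
  let final :=
    (PySem.List.pyRange 0 view_n 1).foldl
      (fun d i =>
        (PySem.List.pyRange 0 view_n 1).foldl
          (fun d j => pvCellStep view_n central range_list d i j) d)
      uv_dic
  final.items

-- ===== PORT B =====

-- the cells comprehension of B for one bucket (lo, hi]
def pvBCells (inner : List Int) (central lo hi : Int) : List (Int × Int) :=
  inner.flatMap (fun i =>
    inner.filterMap (fun j =>
      if lo < (central - i)^2 + (central - j)^2 ∧ (central - i)^2 + (central - j)^2 ≤ hi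
      then some (i, j) else none))

def uv_list_by_n_alt (view_n : Int) : List (String × List Int) :=
  if view_n < 3 then []
  else
    let n1 := view_n - 1
    let inner := PySem.List.pyRange 1 n1 1
    let uv_dic : PySem.Dict String (List Int) := PySem.Dict.mk
      [ ("u3h", inner.flatMap (fun i => [(0 : Int), n1].map (fun _ => i))),
        ("v3h", inner.flatMap (fun _ => [(0 : Int), n1])),
        ("u3v", [(0 : Int), n1].flatMap (fun i => inner.map (fun _ => i))),
        ("v3v", [(0 : Int), n1].flatMap (fun _ => inner)),
        ("u3hv", [(0 : Int), n1].flatMap (fun i => [(0 : Int), n1].map (fun _ => i))),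
        ("v3hv", [(0 : Int), n1].flatMap (fun _ => [(0 : Int), n1])) ]
    let central := PySem.Int.floordiv view_n 2
    let final :=
      (PySem.List.pyRange (PySem.Int.floordiv view_n 2 - 1) (-1) (-1)).foldl
        (fun d item =>
          let lo := if item > 0 then 2 * (item - 1) ^ 2 else -1
          let hi := 2 * item ^ 2
          let cells := pvBCells inner central lo hi
          (d.insert ("u" ++ PySem.Int.toStr (view_n - 2 * item)) (cells.map (fun c => c.1))).insert
            ("v" ++ PySem.Int.toStr (view_n - 2 * item)) (cells.map (fun c => c.2)))
        uv_dic
    final.items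

-- ===== PRECONDITION & SPEC =====
-- Pre_ excludes exactly the inputs where A raises KeyError: view_n ∈ {1,2} and even view_n ≥ 4
-- (labels/keys for those are never initialized); A returns normally on view_n ≤ 0 and on odd view_n ≥ 3.
def Pre_uv_list_by_n (view_n : Int) : Prop :=
  view_n ≤ 0 ∨ (3 ≤ view_n ∧ PySem.Int.mod view_n 2 = 1)
instance (view_n : Int) : Decidable (Pre_uv_list_by_n view_n) := by
  unfold Pre_uv_list_by_n; infer_instance
def pvWitness_uv_list_by_n : Int := 5

def Spec_uv_list_by_n (view_n : Int) (out : List (String × List Int)) : Prop :=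
  out = uv_list_by_n_alt view_n
instance (view_n : Int) (out : List (String × List Int)) : Decidable (Spec_uv_list_by_n view_n out) := by
  unfold Spec_uv_list_by_n; infer_instance

-- ===== CLAIM =====
def Claim_equal_uv_list_by_n : Prop :=
  ∀ (view_n : Int), Dom_uv_list_by_n view_n → Pre_uv_list_by_n view_n →
    Spec_uv_list_by_n view_n (uv_list_by_n view_n)
-- ===== LEMMAS AND PROOFS =====

def pvRepr (n : Nat) : List Char :=
  if n / 10 = 0 then [Nat.digitChar (n % 10)]
  else pvRepr (n / 10) ++ [Nat.digitChar (n % 10)]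
  decreasing_by exact Nat.div_lt_self (by omega) (by omega)

theorem pvRepr_def (n : Nat) : pvRepr n =
    if n / 10 = 0 then [Nat.digitChar (n % 10)]
    else pvRepr (n / 10) ++ [Nat.digitChar (n % 10)] := by
  rw [pvRepr]

theorem pvToDigitsCore_eq : ∀ (fuel n : Nat) (acc : List Char), n < fuel →
    Nat.toDigitsCore 10 fuel n acc = pvRepr n ++ acc := by
  intro fuel
  induction fuel with
  | zero => omega
  | succ f ih =>
    intro n acc h
    rw [Nat.toDigitsCore, pvRepr_def n]
    by_cases h0 : n / 10 = 0
    · simp only [h0, if_pos]; rfl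
    · simp only [h0, if_neg, not_false_iff]
      rw [ih _ _ (by omega)]
      simp

theorem pvToDigits_eq (n : Nat) : Nat.toDigits 10 n = pvRepr n := by
  rw [Nat.toDigits, pvToDigitsCore_eq (n + 1) n [] (by omega)]
  simp

theorem pvDigitChar_isDigit {a : Nat} (h : a < 10) : (Nat.digitChar a).isDigit := by
  interval_cases a <;> decide

theorem pvDigitChar_inj {a b : Nat} (ha : a < 10) (hb : b < 10)
    (h : Nat.digitChar a = Nat.digitChar b) : a = b := by
  interval_cases a <;> interval_cases b <;> simp_all [Nat.digitChar]

theorem pvRepr_digits : ∀ (n : Nat), ∀ c ∈ pvRepr n, c.isDigit := by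
  intro n
  induction n using Nat.strong_induction_on with
  | _ n ih =>
    rw [pvRepr_def]
    by_cases h0 : n / 10 = 0
    · rw [if_pos h0]; intro c hc; simp at hc; subst hc; exact pvDigitChar_isDigit (by omega)
    · rw [if_neg h0]; intro c hc
      rcases List.mem_append.1 hc with hc | hc
      · exact ih _ (Nat.div_lt_self (by omega) (by omega)) c hc
      · simp at hc; subst hc; exact pvDigitChar_isDigit (by omega)

theorem pvRepr_ne_nil (n : Nat) : pvRepr n ≠ [] := by
  rw [pvRepr_def]; split <;> simp

theorem pvRepr_inj : ∀ (a b : Nat), pvRepr a = pvRepr b → a = b := by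
  intro a
  induction a using Nat.strong_induction_on with
  | _ a ih =>
    intro b h
    rw [pvRepr_def a, pvRepr_def b] at h
    by_cases ha : a / 10 = 0 <;> by_cases hb : b / 10 = 0 <;>
        simp only [ha, hb, if_true, if_false, ite_true, ite_false] at h
    · simp at h
      have := pvDigitChar_inj (a := a % 10) (b := b % 10) (by omega) (by omega) h
      omega
    · have hl := congrArg List.length h
      have hne := pvRepr_ne_nil (b / 10)
      cases hh : pvRepr (b / 10) <;> simp [hh] at hl hne <;> omega
    · have hl := congrArg List.length h
      have hne := pvRepr_ne_nil (a / 10)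
      cases hh : pvRepr (a / 10) <;> simp [hh] at hl hne <;> omega
    · rw [← List.concat_eq_append, ← List.concat_eq_append, List.concat_inj] at h
      have h1 := ih (a / 10) (Nat.div_lt_self (by omega) (by omega)) _ h.1
      have h2 := pvDigitChar_inj (a := a % 10) (b := b % 10) (by omega) (by omega) h.2
      omega

theorem pvToChars_digits {l : Int} (h : 0 ≤ l) : ∀ c ∈ PySem.Int.toChars l, c.isDigit := by
  rw [PySem.Int.toChars, if_neg (by omega), pvToDigits_eq]
  exact pvRepr_digits _

theorem pvToChars_inj {a b : Int} (h : PySem.Int.toChars a = PySem.Int.toChars b) : a = b := by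
  rw [PySem.Int.toChars, PySem.Int.toChars] at h
  split_ifs at h with ha hb hb
  · simp only [List.cons.injEq, true_and] at h
    simp only [pvToDigits_eq] at h
    have := pvRepr_inj _ _ h
    omega
  · exfalso
    simp only [pvToDigits_eq] at h
    have hm : '-' ∈ pvRepr b.toNat := by rw [← h]; simp
    have := pvRepr_digits b.toNat _ hm
    simp [Char.isDigit] at this
  · exfalso
    simp only [pvToDigits_eq] at h
    have hm : '-' ∈ pvRepr a.toNat := by rw [h]; simp
    have := pvRepr_digits a.toNat _ hm
    simp [Char.isDigit] at this
  · simp only [pvToDigits_eq] at h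
    have := pvRepr_inj _ _ h
    omega

def pvUkey (l : Int) : String := "u" ++ PySem.Int.toStr l
def pvVkey (l : Int) : String := "v" ++ PySem.Int.toStr l

theorem pvUkey_toList (l : Int) : (pvUkey l).toList = 'u' :: PySem.Int.toChars l := by
  rw [pvUkey, String.toList_append, PySem.Int.toList_toStr]; rfl
theorem pvVkey_toList (l : Int) : (pvVkey l).toList = 'v' :: PySem.Int.toChars l := by
  rw [pvVkey, String.toList_append, PySem.Int.toList_toStr]; rfl

theorem pvUkey_inj {a b : Int} (h : pvUkey a = pvUkey b) : a = b := by
  have := congrArg String.toList h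
  rw [pvUkey_toList, pvUkey_toList] at this
  exact pvToChars_inj (List.cons.inj this).2
theorem pvVkey_inj {a b : Int} (h : pvVkey a = pvVkey b) : a = b := by
  have := congrArg String.toList h
  rw [pvVkey_toList, pvVkey_toList] at this
  exact pvToChars_inj (List.cons.inj this).2
theorem pvUkey_ne_vkey (a b : Int) : pvUkey a ≠ pvVkey b := by
  intro h
  have := congrArg String.toList h
  rw [pvUkey_toList, pvVkey_toList] at this
  exact absurd (List.cons.inj this).1 (by decide)

-- pvUkey l (0 ≤ l) differs from any literal whose tail contains a non-digit
theorem pvUkey_ne_lit {l : Int} (hl : 0 ≤ l) {s : String} {c : Char} (hc : c ∈ s.toList.tail)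
    (hcd : ¬ c.isDigit) (hhead : s.toList.head? = some 'u') : pvUkey l ≠ s := by
  intro h
  have h2 := congrArg String.toList h
  rw [pvUkey_toList] at h2
  cases hs : s.toList with
  | nil => rw [hs] at h2; cases h2
  | cons a t =>
    rw [hs] at h2 hc
    have := (List.cons.inj h2).2
    exact hcd (pvToChars_digits hl c (by rw [this]; exact hc))
theorem pvVkey_ne_lit {l : Int} (hl : 0 ≤ l) {s : String} {c : Char} (hc : c ∈ s.toList.tail)
    (hcd : ¬ c.isDigit) (hhead : s.toList.head? = some 'v') : pvVkey l ≠ s := by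
  intro h
  have h2 := congrArg String.toList h
  rw [pvVkey_toList] at h2
  cases hs : s.toList with
  | nil => rw [hs] at h2; cases h2
  | cons a t =>
    rw [hs] at h2 hc
    have := (List.cons.inj h2).2
    exact hcd (pvToChars_digits hl c (by rw [this]; exact hc))
theorem pvUkey_ne_vlit {l : Int} {s : String} (hhead : s.toList.head? = some 'v') :
    pvUkey l ≠ s := by
  intro h
  have h2 := congrArg String.toList h
  rw [pvUkey_toList] at h2
  cases hs : s.toList with
  | nil => rw [hs] at h2; cases h2
  | cons a t =>
    rw [hs] at h2
    rw [hs] at hhead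
    simp at hhead
    exact absurd ((List.cons.inj h2).1.trans hhead) (by decide)
theorem pvVkey_ne_ulit {l : Int} {s : String} (hhead : s.toList.head? = some 'u') :
    pvVkey l ≠ s := by
  intro h
  have h2 := congrArg String.toList h
  rw [pvVkey_toList] at h2
  cases hs : s.toList with
  | nil => rw [hs] at h2; cases h2
  | cons a t =>
    rw [hs] at h2
    rw [hs] at hhead
    simp at hhead
    exact absurd ((List.cons.inj h2).1.trans hhead) (by decide)


def pvRL (K : Nat) : List (Int × Int) :=
  (List.range K).map (fun k : Nat => ((k : Int) ^ 2 * 2, (2 * K + 1 : Int) - 2 * k))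

theorem pvScan_suffix_some (K : Nat) (d : Int) :
    ∀ (c s m : Nat), s ≤ m → m < s + c → d ≤ (m : Int) ^ 2 * 2 →
    (∀ it : Nat, s ≤ it → it < m → ¬ d ≤ (it : Int) ^ 2 * 2) →
    pvScanA d ((List.range' s c).map (fun k : Nat => ((k : Int) ^ 2 * 2, (2 * K + 1 : Int) - 2 * k)))
      = some ((2 * K + 1 : Int) - 2 * m) := by
  intro c
  induction c with
  | zero => omega
  | succ c ih =>
    intro s m hsm hmc hdm hmin
    rw [List.range'_succ, List.map_cons, pvScanA]
    by_cases hds : d ≤ (s : Int) ^ 2 * 2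
    · have : m = s := by
        by_contra hne
        exact hmin s (le_refl s) (by omega) hds
      rw [if_pos hds, this]
    · rw [if_neg hds]
      exact ih (s + 1) m (by
        rcases Nat.eq_or_lt_of_le hsm with h | h
        · exact absurd (h ▸ hdm) hds
        · omega) (by omega) hdm (fun it h1 h2 => hmin it (by omega) h2)

theorem pvScan_suffix_none (K : Nat) (d : Int) :
    ∀ (c s : Nat), (∀ it : Nat, s ≤ it → it < s + c → ¬ d ≤ (it : Int) ^ 2 * 2) →
    pvScanA d ((List.range' s c).map (fun k : Nat => ((k : Int) ^ 2 * 2, (2 * K + 1 : Int) - 2 * k)))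
      = none := by
  intro c
  induction c with
  | zero => intro s _; rfl
  | succ c ih =>
    intro s hmin
    rw [List.range'_succ, List.map_cons, pvScanA]
    rw [if_neg (hmin s (le_refl s) (by omega))]
    exact ih (s + 1) (fun it h1 h2 => hmin it (by omega) (by omega))

-- total characterization at the concrete bucket m: first-match = interval membership
theorem pvScan_iff (K m : Nat) (hm : m < K) (d : Int) (hd : 0 ≤ d) :
    pvScanA d (pvRL K) = some ((2 * K + 1 : Int) - 2 * m) ↔
      ((if 0 < m then 2 * ((m : Int) - 1) ^ 2 else -1) < d ∧ d ≤ 2 * (m : Int) ^ 2) := by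
  have hrl : pvRL K = (List.range' 0 K).map
      (fun k : Nat => ((k : Int) ^ 2 * 2, (2 * K + 1 : Int) - 2 * k)) := by
    rw [pvRL, List.range_eq_range']
  constructor
  · intro h
    by_contra hno
    -- either d ≤ lo (an earlier bucket matches) or d > hi (first match is later or none)
    by_cases hhi : d ≤ 2 * (m : Int) ^ 2
    · -- then d ≤ lo, so m ≥ 1 and some it < m matches; first match m0 < m
      have hlo : ¬ ((if 0 < m then 2 * ((m : Int) - 1) ^ 2 else -1) < d) := fun hc => hno ⟨hc, hhi⟩
      push_neg at hlo
      have hmpos : 0 < m := by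
        by_contra hz
        rw [if_neg hz] at hlo; omega
      rw [if_pos hmpos] at hlo
      have hex : ∃ it : Nat, d ≤ (it : Int) ^ 2 * 2 := ⟨m - 1, by push_cast [hmpos]; omega⟩
      have hfind := Nat.find_spec hex
      have hfle : Nat.find hex ≤ m - 1 := Nat.find_le (by push_cast [hmpos]; omega)
      rw [hrl, pvScan_suffix_some K d K 0 (Nat.find hex) (by omega) (by omega) hfind
        (fun it _ h2 => Nat.find_min hex h2)] at h
      have : Nat.find hex = m := by
        have := Option.some.inj h
        omega
      omega
    · -- d > hi: the first match (if any) is > m, or none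
      by_cases hex : ∃ it : Nat, it < K ∧ d ≤ (it : Int) ^ 2 * 2
      · obtain ⟨it0, hit0, hdit0⟩ := hex
        have hex' : ∃ it : Nat, d ≤ (it : Int) ^ 2 * 2 := ⟨it0, hdit0⟩
        have hgt : m < Nat.find hex' := by
          rcases Nat.lt_or_ge m (Nat.find hex') with h' | h'
          · exact h'
          · exfalso
            have := Nat.find_spec hex'
            have hmono : d ≤ (m : Int) ^ 2 * 2 := by
              have h2 : ((Nat.find hex' : Int)) ^ 2 ≤ (m : Int) ^ 2 := by
                have : ((Nat.find hex' : Nat) : Int) ≤ (m : Int) := by exact_mod_cast h'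
                nlinarith [this, Int.natCast_nonneg (Nat.find hex')]
              nlinarith
            omega
        have hfk : Nat.find hex' ≤ it0 := Nat.find_le hdit0
        rw [hrl, pvScan_suffix_some K d K 0 (Nat.find hex') (by omega) (by omega)
          (Nat.find_spec hex') (fun it _ h2 => Nat.find_min hex' h2)] at h
        have := Option.some.inj h
        omega
      · rw [hrl, pvScan_suffix_none K d K 0
          (fun it _ h2 hc => hex ⟨it, by omega, hc⟩)] at h
        cases h
  · rintro ⟨hlo, hhi⟩
    rw [hrl]
    apply pvScan_suffix_some K d K 0 m (by omega) (by omega) (by omega)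
    intro it _ hitm
    by_cases hmpos : 0 < m
    · rw [if_pos hmpos] at hlo
      have h2 : ((it : Int)) ^ 2 ≤ ((m : Int) - 1) ^ 2 := by
        have h3 : (it : Int) ≤ (m : Int) - 1 := by
          have : (it : Int) < m := by exact_mod_cast hitm
          omega
        nlinarith [Int.natCast_nonneg it]
      omega
    · omega

-- ===== Dict layer =====

theorem pvItems_insert_fresh {d : PySem.Dict String (List Int)} {k : String} {v : List Int}
    (h : k ∉ d.keys) : (d.insert k v).items = d.items ++ [(k, v)] := by
  have hc : d.contains k = false := by
    rw [PySem.Dict.contains, List.any_eq_false]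
    intro p hp
    simp only [beq_iff_eq]
    intro he
    exact h (List.mem_map.2 ⟨p, hp, he⟩)
  simp [PySem.Dict.insert, hc]

theorem pvKeys_insert_fresh {d : PySem.Dict String (List Int)} {k : String} {v : List Int}
    (h : k ∉ d.keys) : (d.insert k v).keys = d.keys ++ [k] := by
  rw [PySem.Dict.keys, pvItems_insert_fresh h]
  simp [PySem.Dict.keys]

theorem pvGetD_cons {p : String × List Int} {rest : List (String × List Int)} {k : String} :
    (PySem.Dict.mk (p :: rest)).getD k [] =
      if p.1 = k then p.2 else (PySem.Dict.mk rest).getD k [] := by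
  rw [PySem.Dict.getD, PySem.Dict.getD]
  cases p with
  | mk k' v =>
    rw [PySem.Dict.get?_mk_cons]
    by_cases h : k' = k
    · simp [h]
    · simp only [beq_iff_eq, h, if_false, if_neg h]

theorem pvItems_eq_keys_map (d : PySem.Dict String (List Int)) (h : d.keys.Nodup) :
    d.items = d.keys.map (fun k => (k, d.getD k [])) := by
  cases d with
  | mk items =>
    induction items with
    | nil => rfl
    | cons p rest ih =>
      have hkeys : (PySem.Dict.mk (p :: rest)).keys = p.1 :: (PySem.Dict.mk rest).keys := by
        simp [PySem.Dict.keys]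
      rw [hkeys] at h ⊢
      have h1 : p.1 ∉ (PySem.Dict.mk rest).keys := (List.nodup_cons.1 h).1
      have h2 := (List.nodup_cons.1 h).2
      rw [List.map_cons]
      have hhead : (PySem.Dict.mk (p :: rest)).getD p.1 [] = p.2 := by
        rw [pvGetD_cons, if_pos rfl]
      rw [hhead]
      have htail : ((PySem.Dict.mk rest).keys).map
            (fun k => (k, (PySem.Dict.mk (p :: rest)).getD k [])) =
          ((PySem.Dict.mk rest).keys).map (fun k => (k, (PySem.Dict.mk rest).getD k [])) := by
        apply List.map_congr_left
        intro k hk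
        rw [pvGetD_cons, if_neg (fun he => h1 (by rw [he]; exact hk))]
      rw [htail, ← ih h2]

theorem pvGetD_nil_values (d : PySem.Dict String (List Int))
    (h : ∀ p ∈ d.items, p.2 = ([] : List Int)) (k : String) : d.getD k [] = [] := by
  rw [PySem.Dict.getD, PySem.Dict.get?]
  cases hf : d.items.find? (fun p => p.1 == k) with
  | none => rfl
  | some p => simp [h p (List.mem_of_find?_eq_some hf)]

theorem pvSet_update_eq {l m : List String} (h : ∀ x ∈ m, x ∈ l) :
    PySem.Set.update l m = l := by
  induction m generalizing l with
  | nil => rfl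
  | cons a t ih =>
    rw [PySem.Set.update_cons, PySem.Set.add_of_mem (h a (List.mem_cons_self))]
    exact ih (fun x hx => h x (List.mem_cons_of_mem _ hx))

theorem pvFoldl_flatMap {α β σ : Type} (g : α → List β) (f : σ → β → σ) (l : List α) (init : σ) :
    (l.flatMap g).foldl f init = l.foldl (fun a x => (g x).foldl f a) init := by
  induction l generalizing init with
  | nil => rfl
  | cons a t ih => rw [List.flatMap_cons, List.foldl_append, List.foldl_cons, ih]

-- generic double-insert fold with fresh keys
theorem pvFoldl_insert_uv {ι : Type} (lab : ι → Int) (U V : ι → List Int) :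
    ∀ (L : List ι) (d : PySem.Dict String (List Int)),
    (∀ x ∈ L, pvUkey (lab x) ∉ d.keys ∧ pvVkey (lab x) ∉ d.keys) →
    (L.Pairwise (fun a b => lab a ≠ lab b)) →
    L.foldl (fun d x => (d.insert (pvUkey (lab x)) (U x)).insert (pvVkey (lab x)) (V x)) d
      = PySem.Dict.mk (d.items ++ L.flatMap (fun x => [(pvUkey (lab x), U x), (pvVkey (lab x), V x)])) := by
  intro L
  induction L with
  | nil => intro d _ _; simp
  | cons a t ih =>
    intro d hfresh hpw
    rw [List.foldl_cons]
    have hu : pvUkey (lab a) ∉ d.keys := (hfresh a (List.mem_cons_self)).1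
    have hv : pvVkey (lab a) ∉ d.keys := (hfresh a (List.mem_cons_self)).2
    have hv2 : pvVkey (lab a) ∉ (d.insert (pvUkey (lab a)) (U a)).keys := by
      rw [pvKeys_insert_fresh hu]
      intro hmem
      rcases List.mem_append.1 hmem with h | h
      · exact hv h
      · simp at h
        exact pvUkey_ne_vkey (lab a) (lab a) h.symm
    have hstep : ((d.insert (pvUkey (lab a)) (U a)).insert (pvVkey (lab a)) (V a)).items
        = d.items ++ [(pvUkey (lab a), U a), (pvVkey (lab a), V a)] := by
      rw [pvItems_insert_fresh hv2, pvItems_insert_fresh hu]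
      simp
    have hkeysstep : ((d.insert (pvUkey (lab a)) (U a)).insert (pvVkey (lab a)) (V a)).keys
        = d.keys ++ [pvUkey (lab a), pvVkey (lab a)] := by
      rw [pvKeys_insert_fresh hv2, pvKeys_insert_fresh hu]
      simp
    rw [ih _ (by
      intro x hx
      rw [hkeysstep]
      have hne : lab x ≠ lab a := by
        have := (List.pairwise_cons.1 hpw).1 x hx
        exact fun he => this he.symm
      constructor
      · intro hmem
        rcases List.mem_append.1 hmem with h | h
        · exact (hfresh x (List.mem_cons_of_mem _ hx)).1 h
        · simp at h
          rcases h with h | h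
          · exact hne (pvUkey_inj h)
          · exact pvUkey_ne_vkey (lab x) (lab a) h
      · intro hmem
        rcases List.mem_append.1 hmem with h | h
        · exact (hfresh x (List.mem_cons_of_mem _ hx)).2 h
        · simp at h
          rcases h with h | h
          · exact pvUkey_ne_vkey (lab a) (lab x) h.symm
          · exact hne (pvVkey_inj h)) ((List.pairwise_cons.1 hpw).2)]
    rw [hstep]
    simp



-- ===== assembly definitions =====

def pvBase6 : List (String × List Int) :=
  [("u3h", []), ("v3h", []), ("u3v", []), ("v3v", []), ("u3hv", []), ("v3hv", [])]

def pvInitItems (K : Nat) : List (String × List Int) :=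
  pvBase6 ++ (List.range K).flatMap (fun t : Nat =>
    [(pvUkey (3 + 2 * (t : Int)), []), (pvVkey (3 + 2 * (t : Int)), [])])

def pvInner (K : Nat) : List Int := PySem.List.pyRange 1 (2 * (K : Int) + 1 - 1) 1

def pvLo (m : Int) : Int := if m > 0 then 2 * (m - 1) ^ 2 else -1
def pvHi (m : Int) : Int := 2 * m ^ 2

def pvBU (K t : Nat) : List Int :=
  (pvBCells (pvInner K) K (pvLo ((K : Int) - 1 - t)) (pvHi ((K : Int) - 1 - t))).map (fun c => c.1)
def pvBV (K t : Nat) : List Int :=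
  (pvBCells (pvInner K) K (pvLo ((K : Int) - 1 - t)) (pvHi ((K : Int) - 1 - t))).map (fun c => c.2)

def pvBase6Vals (K : Nat) : List (String × List Int) :=
  [("u3h", (pvInner K).flatMap (fun i => [(0 : Int), 2 * (K : Int) + 1 - 1].map (fun _ => i))),
   ("v3h", (pvInner K).flatMap (fun _ => [(0 : Int), 2 * (K : Int) + 1 - 1])),
   ("u3v", [(0 : Int), 2 * (K : Int) + 1 - 1].flatMap (fun i => (pvInner K).map (fun _ => i))),
   ("v3v", [(0 : Int), 2 * (K : Int) + 1 - 1].flatMap (fun _ => pvInner K)),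
   ("u3hv", [(0 : Int), 2 * (K : Int) + 1 - 1].flatMap (fun i => [(0 : Int), 2 * (K : Int) + 1 - 1].map (fun _ => i))),
   ("v3hv", [(0 : Int), 2 * (K : Int) + 1 - 1].flatMap (fun _ => [(0 : Int), 2 * (K : Int) + 1 - 1]))]

def pvFinalItems (K : Nat) : List (String × List Int) :=
  pvBase6Vals K ++ (List.range K).flatMap (fun t : Nat =>
    [(pvUkey (3 + 2 * (t : Int)), pvBU K t), (pvVkey (3 + 2 * (t : Int)), pvBV K t)])

def pvAppsGen (n c : Int) (rl : List (Int × Int)) (i j : Int) : List (String × Int) :=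
  if (i = 0 ∨ i = n - 1) ∧ (j = 0 ∨ j = n - 1) then [("u3hv", i), ("v3hv", j)]
  else if (¬(i = 0 ∨ i = n - 1)) ∧ (j = 0 ∨ j = n - 1) then [("u3h", i), ("v3h", j)]
  else if (i = 0 ∨ i = n - 1) ∧ (¬(j = 0 ∨ j = n - 1)) then [("u3v", i), ("v3v", j)]
  else
    match pvScanA ((c - i) ^ 2 + (c - j) ^ 2) rl with
    | some lbl => [(pvUkey lbl, i), (pvVkey lbl, j)]
    | none => []

def pvAllApps (K : Nat) : List (String × Int) :=
  (PySem.List.pyRange 0 (2 * (K : Int) + 1) 1).flatMap (fun i =>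
    (PySem.List.pyRange 0 (2 * (K : Int) + 1) 1).flatMap (fun j =>
      pvAppsGen (2 * (K : Int) + 1) K (pvRL K) i j))

def pvG (K : Nat) (q : String) (i j : Int) : List Int :=
  ((pvAppsGen (2 * (K : Int) + 1) (K : Int) (pvRL K) i j).filter (fun p => p.1 == q)).map (fun p => p.2)

def pvRowFil (K : Nat) (q : String) (i : Int) : List Int :=
  (PySem.List.pyRange 0 (2 * (K : Int) + 1) 1).flatMap (fun j => pvG K q i j)

-- ===== basic arithmetic / range lemmas =====

theorem pvFloordiv (K : Nat) : PySem.Int.floordiv (2 * (K : Int) + 1) 2 = (K : Int) := by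
  rw [PySem.Int.floordiv_eq_iff_of_pos (by norm_num)]
  omega

theorem pvFilter2 (k1 k2 q : String) (a b : Int) :
    (([(k1, a), (k2, b)] : List (String × Int)).filter (fun p => p.1 == q)).map (fun p => p.2)
      = (if k1 = q then [a] else []) ++ (if k2 = q then [b] else []) := by
  have hb : ∀ s : String, (s == q) = decide (s = q) := fun s => by
    by_cases h : s = q
    · simp [h]
    · simp [h, beq_eq_false_iff_ne.mpr h]
  by_cases h1 : k1 = q <;> by_cases h2 : k2 = q <;>
    simp [List.filter, hb, h1, h2]

theorem pvRL_eq (K : Nat) :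
    (PySem.List.pyRange 0 (K : Int) 1).map (fun item => (item ^ 2 * 2, 2 * (K : Int) + 1 - 2 * item))
      = pvRL K := by
  rw [PySem.List.pyRange_one, List.map_map, pvRL]
  have h1 : ((K : Int) - 0).toNat = K := by omega
  rw [h1]
  apply List.map_congr_left
  intro k _
  norm_num

theorem pvRows_split (K : Nat) (hK : 1 ≤ K) :
    PySem.List.pyRange 0 (2 * (K : Int) + 1) 1 = [0] ++ pvInner K ++ [2 * (K : Int) + 1 - 1] := by
  rw [PySem.List.pyRange_one_append 0 1 (2 * (K : Int) + 1) (by omega) (by omega),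
    PySem.List.pyRange_one_append 1 (2 * (K : Int) + 1 - 1) (2 * (K : Int) + 1) (by omega) (by omega)]
  have h1 : PySem.List.pyRange 0 1 = [0] := by
    have := PySem.List.pyRange_one_singleton (0 : Int)
    simpa using this
  have h2 : PySem.List.pyRange (2 * (K : Int) + 1 - 1) (2 * (K : Int) + 1) = [2 * (K : Int) + 1 - 1] := by
    have := PySem.List.pyRange_one_singleton (2 * (K : Int) + 1 - 1)
    have he : (2 * (K : Int) + 1 - 1) + 1 = 2 * (K : Int) + 1 := by ring
    rw [he] at this
    exact this
  rw [h1, h2, pvInner]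
  simp

theorem pvMem_inner (K : Nat) (i : Int) (h : i ∈ pvInner K) :
    ¬(i = 0 ∨ i = 2 * (K : Int) + 1 - 1) := by
  rw [pvInner] at h
  have := PySem.List.mem_pyRange_one.1 h
  omega

-- ===== pvAppsGen evaluation =====

theorem pvAppsGen_bb {n c : Int} {rl : List (Int × Int)} {i j : Int}
    (hi : i = 0 ∨ i = n - 1) (hj : j = 0 ∨ j = n - 1) :
    pvAppsGen n c rl i j = [("u3hv", i), ("v3hv", j)] := by
  rw [pvAppsGen, if_pos ⟨hi, hj⟩]

theorem pvAppsGen_ib {n c : Int} {rl : List (Int × Int)} {i j : Int}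
    (hi : ¬(i = 0 ∨ i = n - 1)) (hj : j = 0 ∨ j = n - 1) :
    pvAppsGen n c rl i j = [("u3h", i), ("v3h", j)] := by
  rw [pvAppsGen, if_neg (fun hc => hi hc.1), if_pos ⟨hi, hj⟩]

theorem pvAppsGen_bi {n c : Int} {rl : List (Int × Int)} {i j : Int}
    (hi : i = 0 ∨ i = n - 1) (hj : ¬(j = 0 ∨ j = n - 1)) :
    pvAppsGen n c rl i j = [("u3v", i), ("v3v", j)] := by
  rw [pvAppsGen, if_neg (fun hc => hj hc.2), if_neg (fun hc => hc.1 hi), if_pos ⟨hi, hj⟩]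

theorem pvAppsGen_ii {n c : Int} {rl : List (Int × Int)} {i j : Int}
    (hi : ¬(i = 0 ∨ i = n - 1)) (hj : ¬(j = 0 ∨ j = n - 1)) :
    pvAppsGen n c rl i j =
      match pvScanA ((c - i) ^ 2 + (c - j) ^ 2) rl with
      | some lbl => [(pvUkey lbl, i), (pvVkey lbl, j)]
      | none => [] := by
  rw [pvAppsGen, if_neg (fun hc => hi hc.1), if_neg (fun hc => hj hc.2),
    if_neg (fun hc => hi hc.1)]

theorem pvScan_mem {d : Int} {rl : List (Int × Int)} {l : Int}
    (h : pvScanA d rl = some l) : l ∈ rl.map (fun p => p.2) := by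
  induction rl with
  | nil => cases h
  | cons p rest ih =>
    rw [pvScanA] at h
    by_cases hd : d ≤ p.1
    · rw [if_pos hd] at h
      simp [Option.some.inj h]
    · rw [if_neg hd] at h
      simp [ih h]

theorem pvScan_nonneg {K : Nat} {d l : Int} (h : pvScanA d (pvRL K) = some l) :
    0 ≤ l ∧ ∃ t : Nat, t < K ∧ l = 3 + 2 * (t : Int) := by
  have := pvScan_mem h
  rw [pvRL, List.map_map] at this
  obtain ⟨k, hk, he⟩ := List.mem_map.1 this
  simp only [Function.comp] at he
  have hkK : k < K := List.mem_range.1 hk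
  refine ⟨by omega, K - 1 - k, by omega, by push_cast; omega⟩

-- ===== pvG evaluation =====

theorem pvG_bb {K : Nat} {i j : Int} (q : String)
    (hi : i = 0 ∨ i = 2 * (K : Int) + 1 - 1) (hj : j = 0 ∨ j = 2 * (K : Int) + 1 - 1) :
    pvG K q i j = (if "u3hv" = q then [i] else []) ++ (if "v3hv" = q then [j] else []) := by
  rw [pvG, pvAppsGen_bb hi hj, pvFilter2]

theorem pvG_ib {K : Nat} {i j : Int} (q : String)
    (hi : ¬(i = 0 ∨ i = 2 * (K : Int) + 1 - 1)) (hj : j = 0 ∨ j = 2 * (K : Int) + 1 - 1) :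
    pvG K q i j = (if "u3h" = q then [i] else []) ++ (if "v3h" = q then [j] else []) := by
  rw [pvG, pvAppsGen_ib hi hj, pvFilter2]

theorem pvG_bi {K : Nat} {i j : Int} (q : String)
    (hi : i = 0 ∨ i = 2 * (K : Int) + 1 - 1) (hj : ¬(j = 0 ∨ j = 2 * (K : Int) + 1 - 1)) :
    pvG K q i j = (if "u3v" = q then [i] else []) ++ (if "v3v" = q then [j] else []) := by
  rw [pvG, pvAppsGen_bi hi hj, pvFilter2]

theorem pvG_ii_base {K : Nat} {i j : Int} (q : String)
    (hi : ¬(i = 0 ∨ i = 2 * (K : Int) + 1 - 1)) (hj : ¬(j = 0 ∨ j = 2 * (K : Int) + 1 - 1))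
    (hqu : ∀ l : Int, 0 ≤ l → pvUkey l ≠ q) (hqv : ∀ l : Int, 0 ≤ l → pvVkey l ≠ q) :
    pvG K q i j = [] := by
  rw [pvG, pvAppsGen_ii hi hj]
  cases hscan : pvScanA (((K : Int) - i) ^ 2 + ((K : Int) - j) ^ 2) (pvRL K) with
  | none => rfl
  | some l =>
    have hl := (pvScan_nonneg hscan).1
    rw [pvFilter2, if_neg (hqu l hl), if_neg (hqv l hl)]
    rfl

theorem pvG_ii_u {K : Nat} (t : Nat) (ht : t < K) {i j : Int}
    (hi : ¬(i = 0 ∨ i = 2 * (K : Int) + 1 - 1)) (hj : ¬(j = 0 ∨ j = 2 * (K : Int) + 1 - 1)) :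
    pvG K (pvUkey (3 + 2 * (t : Int))) i j =
      if pvLo ((K : Int) - 1 - t) < ((K : Int) - i) ^ 2 + ((K : Int) - j) ^ 2 ∧
          ((K : Int) - i) ^ 2 + ((K : Int) - j) ^ 2 ≤ pvHi ((K : Int) - 1 - t)
      then [i] else [] := by
  have hd : 0 ≤ ((K : Int) - i) ^ 2 + ((K : Int) - j) ^ 2 := by positivity
  have hm : K - 1 - t < K := by omega
  have hcast : ((K : Int) - 1 - t) = ((K - 1 - t : Nat) : Int) := by push_cast; omega
  have hlab : (2 * (K : Int) + 1) - 2 * ((K - 1 - t : Nat) : Int) = 3 + 2 * (t : Int) := by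
    push_cast; omega
  have hiff := pvScan_iff K (K - 1 - t) hm (((K : Int) - i) ^ 2 + ((K : Int) - j) ^ 2) hd
  rw [hlab] at hiff
  have hlo : pvLo ((K : Int) - 1 - t)
      = (if 0 < K - 1 - t then 2 * (((K - 1 - t : Nat) : Int) - 1) ^ 2 else -1) := by
    rw [pvLo, hcast]
    by_cases h : 0 < K - 1 - t
    · rw [if_pos (by exact_mod_cast h), if_pos h]
    · rw [if_neg (by simp; omega), if_neg h]
  have hhi : pvHi ((K : Int) - 1 - t) = 2 * ((K - 1 - t : Nat) : Int) ^ 2 := by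
    rw [pvHi, hcast]
  rw [pvG, pvAppsGen_ii hi hj, hlo, hhi]
  cases hscan : pvScanA (((K : Int) - i) ^ 2 + ((K : Int) - j) ^ 2) (pvRL K) with
  | none =>
    rw [if_neg (fun hc => by rw [hiff.2 hc] at hscan; cases hscan)]
    rfl
  | some l =>
    rw [pvFilter2]
    have hv : ¬ (pvVkey l = pvUkey (3 + 2 * (t : Int))) := fun h =>
      pvUkey_ne_vkey (3 + 2 * (t : Int)) l h.symm
    rw [if_neg hv, List.append_nil]
    by_cases hl : pvUkey l = pvUkey (3 + 2 * (t : Int))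
    · rw [if_pos hl]
      have : l = 3 + 2 * (t : Int) := pvUkey_inj hl
      subst this
      rw [if_pos (hiff.1 hscan)]
    · rw [if_neg hl, if_neg (fun hc => hl (by rw [Option.some.inj ((hiff.2 hc).symm.trans hscan)]))]

theorem pvG_ii_v {K : Nat} (t : Nat) (ht : t < K) {i j : Int}
    (hi : ¬(i = 0 ∨ i = 2 * (K : Int) + 1 - 1)) (hj : ¬(j = 0 ∨ j = 2 * (K : Int) + 1 - 1)) :
    pvG K (pvVkey (3 + 2 * (t : Int))) i j =
      if pvLo ((K : Int) - 1 - t) < ((K : Int) - i) ^ 2 + ((K : Int) - j) ^ 2 ∧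
          ((K : Int) - i) ^ 2 + ((K : Int) - j) ^ 2 ≤ pvHi ((K : Int) - 1 - t)
      then [j] else [] := by
  have hd : 0 ≤ ((K : Int) - i) ^ 2 + ((K : Int) - j) ^ 2 := by positivity
  have hm : K - 1 - t < K := by omega
  have hcast : ((K : Int) - 1 - t) = ((K - 1 - t : Nat) : Int) := by push_cast; omega
  have hlab : (2 * (K : Int) + 1) - 2 * ((K - 1 - t : Nat) : Int) = 3 + 2 * (t : Int) := by
    push_cast; omega
  have hiff := pvScan_iff K (K - 1 - t) hm (((K : Int) - i) ^ 2 + ((K : Int) - j) ^ 2) hd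
  rw [hlab] at hiff
  have hlo : pvLo ((K : Int) - 1 - t)
      = (if 0 < K - 1 - t then 2 * (((K - 1 - t : Nat) : Int) - 1) ^ 2 else -1) := by
    rw [pvLo, hcast]
    by_cases h : 0 < K - 1 - t
    · rw [if_pos (by exact_mod_cast h), if_pos h]
    · rw [if_neg (by simp; omega), if_neg h]
  have hhi : pvHi ((K : Int) - 1 - t) = 2 * ((K - 1 - t : Nat) : Int) ^ 2 := by
    rw [pvHi, hcast]
  rw [pvG, pvAppsGen_ii hi hj, hlo, hhi]
  cases hscan : pvScanA (((K : Int) - i) ^ 2 + ((K : Int) - j) ^ 2) (pvRL K) with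
  | none =>
    rw [if_neg (fun hc => by rw [hiff.2 hc] at hscan; cases hscan)]
    rfl
  | some l =>
    rw [pvFilter2]
    have hu : ¬ (pvUkey l = pvVkey (3 + 2 * (t : Int))) := fun h =>
      pvUkey_ne_vkey l (3 + 2 * (t : Int)) h
    rw [if_neg hu, List.nil_append]
    by_cases hl : pvVkey l = pvVkey (3 + 2 * (t : Int))
    · rw [if_pos hl]
      have : l = 3 + 2 * (t : Int) := pvVkey_inj hl
      subst this
      rw [if_pos (hiff.1 hscan)]
    · rw [if_neg hl, if_neg (fun hc => hl (by rw [Option.some.inj ((hiff.2 hc).symm.trans hscan)]))]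



-- ===== init dict characterization =====

theorem pvInitKeys (K : Nat) : (PySem.Dict.mk (pvInitItems K)).keys
    = ["u3h", "v3h", "u3v", "v3v", "u3hv", "v3hv"]
      ++ (List.range K).flatMap (fun t : Nat => [pvUkey (3 + 2 * (t : Int)), pvVkey (3 + 2 * (t : Int))]) := by
  simp [PySem.Dict.keys, pvInitItems, pvBase6, List.map_flatMap]

theorem pvUkey_not_base (a : Int) (ha : 0 ≤ a) :
    ¬ pvUkey a ∈ (["u3h", "v3h", "u3v", "v3v", "u3hv", "v3hv"] : List String) := by
  intro h
  simp only [List.mem_cons, List.not_mem_nil, or_false] at h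
  rcases h with h | h | h | h | h | h
  · exact pvUkey_ne_lit ha (c := 'h') (by decide) (by decide) (by decide) h
  · exact pvUkey_ne_vlit (by decide) h
  · exact pvUkey_ne_lit ha (c := 'v') (by decide) (by decide) (by decide) h
  · exact pvUkey_ne_vlit (by decide) h
  · exact pvUkey_ne_lit ha (c := 'h') (by decide) (by decide) (by decide) h
  · exact pvUkey_ne_vlit (by decide) h

theorem pvVkey_not_base (a : Int) (ha : 0 ≤ a) :
    ¬ pvVkey a ∈ (["u3h", "v3h", "u3v", "v3v", "u3hv", "v3hv"] : List String) := by
  intro h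
  simp only [List.mem_cons, List.not_mem_nil, or_false] at h
  rcases h with h | h | h | h | h | h
  · exact pvVkey_ne_ulit (by decide) h
  · exact pvVkey_ne_lit ha (c := 'h') (by decide) (by decide) (by decide) h
  · exact pvVkey_ne_ulit (by decide) h
  · exact pvVkey_ne_lit ha (c := 'v') (by decide) (by decide) (by decide) h
  · exact pvVkey_ne_ulit (by decide) h
  · exact pvVkey_ne_lit ha (c := 'h') (by decide) (by decide) (by decide) h

theorem pvUkey_not_mem_init (K : Nat) (a : Int) (ha : 0 ≤ a)
    (hno : ∀ t : Nat, t < K → a ≠ 3 + 2 * (t : Int)) :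
    pvUkey a ∉ (PySem.Dict.mk (pvInitItems K)).keys := by
  rw [pvInitKeys]
  intro h
  rcases List.mem_append.1 h with h | h
  · exact pvUkey_not_base a ha h
  · obtain ⟨t, ht, hmem⟩ := List.mem_flatMap.1 h
    simp only [List.mem_cons, List.not_mem_nil, or_false] at hmem
    rcases hmem with h' | h'
    · exact hno t (List.mem_range.1 ht) (pvUkey_inj h')
    · exact pvUkey_ne_vkey a (3 + 2 * (t : Int)) h'

theorem pvVkey_not_mem_init (K : Nat) (a : Int) (ha : 0 ≤ a)
    (hno : ∀ t : Nat, t < K → a ≠ 3 + 2 * (t : Int)) :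
    pvVkey a ∉ (PySem.Dict.mk (pvInitItems K)).keys := by
  rw [pvInitKeys]
  intro h
  rcases List.mem_append.1 h with h | h
  · exact pvVkey_not_base a ha h
  · obtain ⟨t, ht, hmem⟩ := List.mem_flatMap.1 h
    simp only [List.mem_cons, List.not_mem_nil, or_false] at hmem
    rcases hmem with h' | h'
    · exact pvUkey_ne_vkey (3 + 2 * (t : Int)) a h'.symm
    · exact hno t (List.mem_range.1 ht) (pvVkey_inj h')

theorem pvInitKeys_nodup (K : Nat) : (PySem.Dict.mk (pvInitItems K)).keys.Nodup := by
  rw [pvInitKeys]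
  induction K with
  | zero => decide
  | succ K ih =>
    rw [List.range_succ, List.flatMap_append, ← List.append_assoc, List.nodup_append]
    refine ⟨ih, ?_, ?_⟩
    · simp only [List.flatMap_cons, List.flatMap_nil, List.append_nil]
      refine List.nodup_cons.2 ⟨?_, List.nodup_singleton _⟩
      simp only [List.mem_cons, List.not_mem_nil, or_false]
      exact fun h => pvUkey_ne_vkey _ _ h
    · intro a ha b hb
      simp only [List.flatMap_cons, List.flatMap_nil, List.append_nil, List.mem_cons,
        List.not_mem_nil, or_false] at hb
      have hno : ∀ t : Nat, t < K → (3 + 2 * (K : Int)) ≠ 3 + 2 * (t : Int) := by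
        intro t ht
        push_cast
        omega
      have hU := pvUkey_not_mem_init K (3 + 2 * (K : Int)) (by omega) hno
      have hV := pvVkey_not_mem_init K (3 + 2 * (K : Int)) (by omega) hno
      rw [pvInitKeys] at hU hV
      rcases hb with hb | hb <;> subst hb <;> intro he
      · exact hU (he ▸ ha)
      · exact hV (he ▸ ha)

-- app keys are keys of the initialized dict
theorem pvAppKeys_sub (K : Nat) (hK : 1 ≤ K) :
    ∀ p ∈ pvAllApps K, p.1 ∈ (PySem.Dict.mk (pvInitItems K)).keys := by
  intro p hp
  rw [pvInitKeys]
  obtain ⟨i, _, hp⟩ := List.mem_flatMap.1 hp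
  obtain ⟨j, _, hp⟩ := List.mem_flatMap.1 hp
  by_cases hi : i = 0 ∨ i = 2 * (K : Int) + 1 - 1 <;>
    by_cases hj : j = 0 ∨ j = 2 * (K : Int) + 1 - 1
  · rw [pvAppsGen_bb hi hj] at hp
    simp only [List.mem_cons, List.not_mem_nil, or_false] at hp
    rcases hp with h | h <;> subst h <;> simp
  · rw [pvAppsGen_bi hi hj] at hp
    simp only [List.mem_cons, List.not_mem_nil, or_false] at hp
    rcases hp with h | h <;> subst h <;> simp
  · rw [pvAppsGen_ib hi hj] at hp
    simp only [List.mem_cons, List.not_mem_nil, or_false] at hp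
    rcases hp with h | h <;> subst h <;> simp
  · rw [pvAppsGen_ii hi hj] at hp
    cases hscan : pvScanA (((K : Int) - i) ^ 2 + ((K : Int) - j) ^ 2) (pvRL K) with
    | none => rw [hscan] at hp; cases hp
    | some l =>
      rw [hscan] at hp
      obtain ⟨-, t, ht, hl⟩ := pvScan_nonneg hscan
      subst hl
      simp only [List.mem_cons, List.not_mem_nil, or_false] at hp
      apply List.mem_append.2
      right
      apply List.mem_flatMap.2
      refine ⟨t, List.mem_range.2 ht, ?_⟩
      rcases hp with h | h <;> subst h <;> simp

theorem pvInitItems_nilvals (K : Nat) : ∀ p ∈ pvInitItems K, p.2 = ([] : List Int) := by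
  intro p hp
  rcases List.mem_append.1 hp with h | h
  · simp only [pvBase6, List.mem_cons, List.not_mem_nil, or_false] at h
    rcases h with h | h | h | h | h | h <;> subst h <;> rfl
  · obtain ⟨t, _, hmem⟩ := List.mem_flatMap.1 h
    simp only [List.mem_cons, List.not_mem_nil, or_false] at hmem
    rcases hmem with h | h <;> subst h <;> rfl

-- A's key-initialization loop builds exactly pvInitItems
theorem pvA_init (K : Nat) (hK : 1 ≤ K) :
    ((PySem.List.pyRange 3 (2 * (K : Int) + 1 + 1) 2).foldl
      (fun d item =>
        ((if item = 3 then
            (((((d.insert "u3h" ([] : List Int)).insert "v3h" []).insert "u3v" []).insert "v3v"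
                []).insert "u3hv" []).insert "v3hv" []
          else d).insert ("u" ++ PySem.Int.toStr item) []).insert ("v" ++ PySem.Int.toStr item) [])
      PySem.Dict.empty) = PySem.Dict.mk (pvInitItems K) := by
  have hrange : PySem.List.pyRange 3 (2 * (K : Int) + 1 + 1) 2
      = (List.range K).map (fun t : Nat => (3 + 2 * (t : Int))) := by
    rw [PySem.List.pyRange_of_pos _ _ (by norm_num), if_pos (by omega)]
    have h1 : ((2 * (K : Int) + 1 + 1 - 3 + 2 - 1) / 2).toNat = K := by omega
    rw [h1]
  rw [hrange, List.foldl_map]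
  obtain ⟨K', rfl⟩ : ∃ K', K = K' + 1 := ⟨K - 1, by omega⟩
  rw [List.range_succ_eq_map, List.foldl_cons, List.foldl_map]
  have hfirst : ((if (3 + 2 * ((0 : Nat) : Int)) = 3 then
        ((((((PySem.Dict.empty : PySem.Dict String (List Int)).insert "u3h" ([] : List Int)).insert "v3h" []).insert "u3v" []).insert "v3v"
            []).insert "u3hv" []).insert "v3hv" []
      else PySem.Dict.empty).insert ("u" ++ PySem.Int.toStr (3 + 2 * ((0 : Nat) : Int))) []).insert
        ("v" ++ PySem.Int.toStr (3 + 2 * ((0 : Nat) : Int))) []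
      = PySem.Dict.mk (pvBase6 ++ [(pvUkey 3, []), (pvVkey 3, [])]) := by decide
  rw [hfirst]
  rw [PySem.List.foldl_congr_mem _ _
    (g := fun (d : PySem.Dict String (List Int)) (t : Nat) =>
      (d.insert (pvUkey (5 + 2 * (t : Int))) []).insert (pvVkey (5 + 2 * (t : Int))) []) _
    (by
      intro acc t _
      have h3 : (3 + 2 * ((t.succ : Nat) : Int)) = 5 + 2 * (t : Int) := by push_cast; ring
      rw [h3, if_neg (by omega)]
      rfl)]
  rw [pvFoldl_insert_uv (fun t : Nat => 5 + 2 * (t : Int)) (fun _ => []) (fun _ => [])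
    (List.range K') _ ?fresh ?pw]
  case pw =>
    have := List.pairwise_lt_range (n := K')
    exact this.imp (by intro a b hab; push_cast; omega)
  case fresh =>
    intro t _
    have hkeys8 : (PySem.Dict.mk (pvBase6 ++ [(pvUkey 3, ([] : List Int)), (pvVkey 3, [])])).keys
        = ["u3h", "v3h", "u3v", "v3v", "u3hv", "v3hv", pvUkey 3, pvVkey 3] := rfl
    have ha : (0 : Int) ≤ 5 + 2 * (t : Int) := by omega
    constructor
    · rw [hkeys8]
      intro hmem
      simp only [List.mem_cons, List.not_mem_nil, or_false] at hmem
      rcases hmem with h | h | h | h | h | h | h | h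
      · exact pvUkey_ne_lit ha (c := 'h') (by decide) (by decide) (by decide) h
      · exact pvUkey_ne_vlit (by decide) h
      · exact pvUkey_ne_lit ha (c := 'v') (by decide) (by decide) (by decide) h
      · exact pvUkey_ne_vlit (by decide) h
      · exact pvUkey_ne_lit ha (c := 'h') (by decide) (by decide) (by decide) h
      · exact pvUkey_ne_vlit (by decide) h
      · have := pvUkey_inj h; omega
      · exact pvUkey_ne_vkey _ _ h
    · rw [hkeys8]
      intro hmem
      simp only [List.mem_cons, List.not_mem_nil, or_false] at hmem
      rcases hmem with h | h | h | h | h | h | h | h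
      · exact pvVkey_ne_ulit (by decide) h
      · exact pvVkey_ne_lit ha (c := 'h') (by decide) (by decide) (by decide) h
      · exact pvVkey_ne_ulit (by decide) h
      · exact pvVkey_ne_lit ha (c := 'v') (by decide) (by decide) (by decide) h
      · exact pvVkey_ne_ulit (by decide) h
      · exact pvVkey_ne_lit ha (c := 'h') (by decide) (by decide) (by decide) h
      · exact pvUkey_ne_vkey _ _ h.symm
      · have := pvVkey_inj h; omega
  · congr 1
    show pvBase6 ++ [(pvUkey 3, []), (pvVkey 3, [])]
        ++ (List.range K').flatMap (fun t : Nat => [(pvUkey (5 + 2 * (t : Int)), []), (pvVkey (5 + 2 * (t : Int)), [])])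
      = pvInitItems (K' + 1)
    rw [pvInitItems, List.range_succ_eq_map, List.flatMap_cons, List.flatMap_map]
    have h0 : (3 + 2 * ((0 : Nat) : Int)) = 3 := by norm_num
    rw [h0, List.append_assoc]
    congr 2
    apply List.flatMap_congr
    intro t _
    have h3 : (3 + 2 * ((t.succ : Nat) : Int)) = 5 + 2 * (t : Int) := by push_cast; ring
    rw [h3]

-- ===== B characterization =====

theorem pvB_eq (K : Nat) (hK : 1 ≤ K) :
    uv_list_by_n_alt (2 * (K : Int) + 1) = pvFinalItems K := by
  have h3 : ¬ (2 * (K : Int) + 1 < 3) := by omega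
  simp only [uv_list_by_n_alt, if_neg h3]
  rw [pvFloordiv, PySem.List.pyRange_neg_one]
  have hc : ((K : Int) - 1 - (-1)).toNat = K := by omega
  rw [hc, List.foldl_map]
  rw [PySem.List.foldl_congr_mem _ _ _
    (g := fun (d : PySem.Dict String (List Int)) (k : Nat) =>
      (d.insert (pvUkey (3 + 2 * (k : Int))) (pvBU K k)).insert (pvVkey (3 + 2 * (k : Int))) (pvBV K k))
    (by
      intro acc k _
      have hlab : 2 * (K : Int) + 1 - 2 * ((K : Int) - 1 - (k : Int)) = 3 + 2 * (k : Int) := by ring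
      rw [hlab]
      rfl)]
  rw [pvFoldl_insert_uv (fun k : Nat => 3 + 2 * (k : Int)) (pvBU K) (pvBV K) (List.range K) _ ?fresh ?pw]
  case pw =>
    exact (List.pairwise_lt_range).imp (by intro a b hab; push_cast; omega)
  case fresh =>
    intro t _
    have hkeys6 : (PySem.Dict.mk (pvBase6Vals K)).keys
        = ["u3h", "v3h", "u3v", "v3v", "u3hv", "v3hv"] := rfl
    have ha : (0 : Int) ≤ 3 + 2 * (t : Int) := by omega
    constructor
    · exact fun hmem => pvUkey_not_base _ ha (hkeys6 ▸ hmem)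
    · exact fun hmem => pvVkey_not_base _ ha (hkeys6 ▸ hmem)
  · rfl

-- ===== A characterization =====

theorem pvCellStep_eq (n c : Int) (rl : List (Int × Int)) (d : PySem.Dict String (List Int))
    (i j : Int) :
    pvCellStep n c rl d i j
      = (pvAppsGen n c rl i j).foldl (fun d p => d.modify p.1 [] (fun x => x ++ [p.2])) d := by
  rw [pvCellStep, pvAppsGen]
  split_ifs <;> try rfl
  cases pvScanA ((c - i) ^ 2 + (c - j) ^ 2) rl <;> rfl

theorem pvA_eq (K : Nat) (hK : 1 ≤ K) :
    uv_list_by_n (2 * (K : Int) + 1) = (pvInitItems K).map (fun kv =>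
      (kv.1, ((pvAllApps K).filter (fun p => p.1 == kv.1)).map (fun p => p.2))) := by
  simp only [uv_list_by_n]
  rw [PySem.List.foldl_append_singleton_eq_map, List.nil_append, pvFloordiv, pvRL_eq, pvA_init K hK]
  rw [PySem.List.foldl_congr_mem _ _ _
    (g := fun (d : PySem.Dict String (List Int)) (i : Int) =>
      ((PySem.List.pyRange 0 (2 * (K : Int) + 1) 1).flatMap
        (fun j => pvAppsGen (2 * (K : Int) + 1) (K : Int) (pvRL K) i j)).foldl
          (fun d p => d.modify p.1 [] (fun x => x ++ [p.2])) d)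
    (by
      intro acc i _
      beta_reduce
      rw [pvFoldl_flatMap]
      exact PySem.List.foldl_congr_mem _ _ _ _ (fun acc' j _ => pvCellStep_eq _ _ _ _ _ _))]
  have hgrid : List.foldl (fun (d : PySem.Dict String (List Int)) (i : Int) =>
        List.foldl (fun d p => d.modify p.1 [] fun x => x ++ [p.2]) d
          (List.flatMap (fun j => pvAppsGen (2 * (K : Int) + 1) (K : Int) (pvRL K) i j)
            (PySem.List.pyRange 0 (2 * (K : Int) + 1) 1)))
        (PySem.Dict.mk (pvInitItems K)) (PySem.List.pyRange 0 (2 * (K : Int) + 1) 1)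
      = (pvAllApps K).foldl (fun d p => d.modify p.1 [] fun x => x ++ [p.2])
          (PySem.Dict.mk (pvInitItems K)) := by
    rw [pvAllApps, pvFoldl_flatMap]
  rw [hgrid]
  have hkeys : ((pvAllApps K).foldl (fun d p => d.modify p.1 [] (fun x => x ++ [p.2]))
      (PySem.Dict.mk (pvInitItems K))).keys = (PySem.Dict.mk (pvInitItems K)).keys := by
    rw [PySem.Dict.keys_foldl_modify_key (pvAllApps K) (fun p => p.1) []
      (fun _ p => (fun x => x ++ [p.2]))]
    apply pvSet_update_eq
    intro x hx
    obtain ⟨p, hp, rfl⟩ := List.mem_map.1 hx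
    exact pvAppKeys_sub K hK p hp
  have hnodup : ((pvAllApps K).foldl (fun d p => d.modify p.1 [] (fun x => x ++ [p.2]))
      (PySem.Dict.mk (pvInitItems K))).keys.Nodup := by
    rw [hkeys]
    exact pvInitKeys_nodup K
  rw [pvItems_eq_keys_map _ hnodup, hkeys]
  rw [show (PySem.Dict.mk (pvInitItems K)).keys = (pvInitItems K).map (fun kv => kv.1) from rfl,
    List.map_map]
  apply List.map_congr_left
  intro kv _
  simp only [Function.comp]
  rw [PySem.Dict.getD_foldl_modify_append,
    pvGetD_nil_values (PySem.Dict.mk (pvInitItems K))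
      (fun p hp => pvInitItems_nilvals K p hp) kv.1,
    List.nil_append]

-- ===== per-key value computation =====

theorem pvFil_eq (K : Nat) (q : String) :
    ((pvAllApps K).filter (fun p => p.1 == q)).map (fun p => p.2)
      = (PySem.List.pyRange 0 (2 * (K : Int) + 1) 1).flatMap (fun i => pvRowFil K q i) := by
  rw [pvAllApps, List.filter_flatMap, List.map_flatMap]
  apply List.flatMap_congr
  intro i _
  rw [List.filter_flatMap, List.map_flatMap]
  rfl

theorem pvRow_border (K : Nat) (hK : 1 ≤ K) (q : String) (i : Int)
    (hi : i = 0 ∨ i = 2 * (K : Int) + 1 - 1) :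
    pvRowFil K q i = ((if "u3hv" = q then [i] else []) ++ (if "v3hv" = q then [(0 : Int)] else []))
      ++ (pvInner K).flatMap (fun j =>
          (if "u3v" = q then [i] else []) ++ (if "v3v" = q then [j] else []))
      ++ ((if "u3hv" = q then [i] else [])
          ++ (if "v3hv" = q then [2 * (K : Int) + 1 - 1] else [])) := by
  rw [pvRowFil, pvRows_split K hK, List.flatMap_append, List.flatMap_append]
  simp only [List.flatMap_cons, List.flatMap_nil, List.append_nil]
  rw [pvG_bb q hi (Or.inl rfl), pvG_bb q hi (Or.inr rfl)]
  congr 1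
  congr 1
  apply List.flatMap_congr
  intro j hj
  rw [pvG_bi q hi (pvMem_inner K j hj)]

theorem pvRow_inner (K : Nat) (hK : 1 ≤ K) (q : String) (i : Int)
    (hi : ¬(i = 0 ∨ i = 2 * (K : Int) + 1 - 1)) :
    pvRowFil K q i = ((if "u3h" = q then [i] else []) ++ (if "v3h" = q then [(0 : Int)] else []))
      ++ (pvInner K).flatMap (fun j => pvG K q i j)
      ++ ((if "u3h" = q then [i] else [])
          ++ (if "v3h" = q then [2 * (K : Int) + 1 - 1] else [])) := by
  rw [pvRowFil, pvRows_split K hK, List.flatMap_append, List.flatMap_append]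
  simp only [List.flatMap_cons, List.flatMap_nil, List.append_nil]
  rw [pvG_ib q hi (Or.inl rfl), pvG_ib q hi (Or.inr rfl)]

theorem pvFil_split (K : Nat) (hK : 1 ≤ K) (q : String) :
    ((pvAllApps K).filter (fun p => p.1 == q)).map (fun p => p.2)
      = pvRowFil K q 0 ++ (pvInner K).flatMap (fun i => pvRowFil K q i)
        ++ pvRowFil K q (2 * (K : Int) + 1 - 1) := by
  rw [pvFil_eq, pvRows_split K hK, List.flatMap_append, List.flatMap_append]
  simp only [List.flatMap_cons, List.flatMap_nil, List.append_nil]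

theorem pvFlatMap_nil {α β : Type} (l : List α) : l.flatMap (fun _ => ([] : List β)) = [] := by
  simp

theorem pvFlatMap_const {α β : Type} (l : List α) (c : β) :
    l.flatMap (fun _ => [c]) = List.replicate l.length c := by
  induction l with
  | nil => rfl
  | cons a t ih => simp [ih, List.replicate_succ]

theorem pvNe_u3h : ∀ l : Int, 0 ≤ l → pvUkey l ≠ "u3h" := fun _ hl =>
  pvUkey_ne_lit hl (c := 'h') (by decide) (by decide) (by decide)
theorem pvNe_u3v : ∀ l : Int, 0 ≤ l → pvUkey l ≠ "u3v" := fun _ hl =>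
  pvUkey_ne_lit hl (c := 'v') (by decide) (by decide) (by decide)
theorem pvNe_u3hv : ∀ l : Int, 0 ≤ l → pvUkey l ≠ "u3hv" := fun _ hl =>
  pvUkey_ne_lit hl (c := 'h') (by decide) (by decide) (by decide)
theorem pvNe_v3h : ∀ l : Int, 0 ≤ l → pvVkey l ≠ "v3h" := fun _ hl =>
  pvVkey_ne_lit hl (c := 'h') (by decide) (by decide) (by decide)
theorem pvNe_v3v : ∀ l : Int, 0 ≤ l → pvVkey l ≠ "v3v" := fun _ hl =>
  pvVkey_ne_lit hl (c := 'v') (by decide) (by decide) (by decide)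
theorem pvNe_v3hv : ∀ l : Int, 0 ≤ l → pvVkey l ≠ "v3hv" := fun _ hl =>
  pvVkey_ne_lit hl (c := 'h') (by decide) (by decide) (by decide)

theorem pvMid_nil (K : Nat) (hK : 1 ≤ K) (q : String)
    (hqu : ∀ l : Int, 0 ≤ l → pvUkey l ≠ q) (hqv : ∀ l : Int, 0 ≤ l → pvVkey l ≠ q)
    (i : Int) (hi : i ∈ pvInner K) :
    (pvInner K).flatMap (fun j => pvG K q i j) = [] := by
  rw [List.flatMap_congr (fun j hj =>
    pvG_ii_base q (pvMem_inner K i hi) (pvMem_inner K j hj) hqu hqv)]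
  exact pvFlatMap_nil _

theorem pvVL_u3h (K : Nat) (hK : 1 ≤ K) :
    ((pvAllApps K).filter (fun p => p.1 == "u3h")).map (fun p => p.2)
      = (pvInner K).flatMap (fun i => [(0 : Int), 2 * (K : Int) + 1 - 1].map (fun _ => i)) := by
  have hmid : ∀ i ∈ pvInner K, pvRowFil K "u3h" i = [i, i] := by
    intro i hi
    rw [pvRow_inner K hK _ i (pvMem_inner K i hi), pvMid_nil K hK _ pvNe_u3h (fun l _ => pvVkey_ne_ulit (by decide)) i hi]
    simp
  rw [pvFil_split K hK, pvRow_border K hK _ 0 (Or.inl rfl), pvRow_border K hK _ _ (Or.inr rfl),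
    List.flatMap_congr hmid]
  simp [pvFlatMap_nil, pvFlatMap_const]

theorem pvVL_v3h (K : Nat) (hK : 1 ≤ K) :
    ((pvAllApps K).filter (fun p => p.1 == "v3h")).map (fun p => p.2)
      = (pvInner K).flatMap (fun _ => [(0 : Int), 2 * (K : Int) + 1 - 1]) := by
  have hmid : ∀ i ∈ pvInner K, pvRowFil K "v3h" i = [(0 : Int), 2 * (K : Int) + 1 - 1] := by
    intro i hi
    rw [pvRow_inner K hK _ i (pvMem_inner K i hi), pvMid_nil K hK _ (fun l _ => pvUkey_ne_vlit (by decide)) pvNe_v3h i hi]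
    simp
  rw [pvFil_split K hK, pvRow_border K hK _ 0 (Or.inl rfl), pvRow_border K hK _ _ (Or.inr rfl),
    List.flatMap_congr hmid]
  simp [pvFlatMap_nil, pvFlatMap_const]

theorem pvVL_u3v (K : Nat) (hK : 1 ≤ K) :
    ((pvAllApps K).filter (fun p => p.1 == "u3v")).map (fun p => p.2)
      = [(0 : Int), 2 * (K : Int) + 1 - 1].flatMap (fun i => (pvInner K).map (fun _ => i)) := by
  have hmid : ∀ i ∈ pvInner K, pvRowFil K "u3v" i = ([] : List Int) := by
    intro i hi
    rw [pvRow_inner K hK _ i (pvMem_inner K i hi), pvMid_nil K hK _ pvNe_u3v (fun l _ => pvVkey_ne_ulit (by decide)) i hi]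
    simp
  rw [pvFil_split K hK, pvRow_border K hK _ 0 (Or.inl rfl), pvRow_border K hK _ _ (Or.inr rfl),
    List.flatMap_congr hmid]
  simp [pvFlatMap_nil, pvFlatMap_const]

theorem pvVL_v3v (K : Nat) (hK : 1 ≤ K) :
    ((pvAllApps K).filter (fun p => p.1 == "v3v")).map (fun p => p.2)
      = [(0 : Int), 2 * (K : Int) + 1 - 1].flatMap (fun _ => pvInner K) := by
  have hmid : ∀ i ∈ pvInner K, pvRowFil K "v3v" i = ([] : List Int) := by
    intro i hi
    rw [pvRow_inner K hK _ i (pvMem_inner K i hi), pvMid_nil K hK _ (fun l _ => pvUkey_ne_vlit (by decide)) pvNe_v3v i hi]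
    simp
  rw [pvFil_split K hK, pvRow_border K hK _ 0 (Or.inl rfl), pvRow_border K hK _ _ (Or.inr rfl),
    List.flatMap_congr hmid]
  simp [pvFlatMap_nil, pvFlatMap_const]

theorem pvVL_u3hv (K : Nat) (hK : 1 ≤ K) :
    ((pvAllApps K).filter (fun p => p.1 == "u3hv")).map (fun p => p.2)
      = [(0 : Int), 2 * (K : Int) + 1 - 1].flatMap (fun i => [(0 : Int), 2 * (K : Int) + 1 - 1].map (fun _ => i)) := by
  have hmid : ∀ i ∈ pvInner K, pvRowFil K "u3hv" i = ([] : List Int) := by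
    intro i hi
    rw [pvRow_inner K hK _ i (pvMem_inner K i hi), pvMid_nil K hK _ pvNe_u3hv (fun l _ => pvVkey_ne_ulit (by decide)) i hi]
    simp
  rw [pvFil_split K hK, pvRow_border K hK _ 0 (Or.inl rfl), pvRow_border K hK _ _ (Or.inr rfl),
    List.flatMap_congr hmid]
  simp [pvFlatMap_nil, pvFlatMap_const]

theorem pvVL_v3hv (K : Nat) (hK : 1 ≤ K) :
    ((pvAllApps K).filter (fun p => p.1 == "v3hv")).map (fun p => p.2)
      = [(0 : Int), 2 * (K : Int) + 1 - 1].flatMap (fun _ => [(0 : Int), 2 * (K : Int) + 1 - 1]) := by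
  have hmid : ∀ i ∈ pvInner K, pvRowFil K "v3hv" i = ([] : List Int) := by
    intro i hi
    rw [pvRow_inner K hK _ i (pvMem_inner K i hi), pvMid_nil K hK _ (fun l _ => pvUkey_ne_vlit (by decide)) pvNe_v3hv i hi]
    simp
  rw [pvFil_split K hK, pvRow_border K hK _ 0 (Or.inl rfl), pvRow_border K hK _ _ (Or.inr rfl),
    List.flatMap_congr hmid]
  simp [pvFlatMap_nil, pvFlatMap_const]

theorem pvVL_label_u (K t : Nat) (hK : 1 ≤ K) (ht : t < K) :
    ((pvAllApps K).filter (fun p => p.1 == pvUkey (3 + 2 * (t : Int)))).map (fun p => p.2)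
      = pvBU K t := by
  have ha : (0 : Int) ≤ 3 + 2 * (t : Int) := by omega
  have h1 : ¬("u3hv" = pvUkey (3 + 2 * (t : Int))) := fun h => pvNe_u3hv _ ha h.symm
  have h2 : ¬("v3hv" = pvUkey (3 + 2 * (t : Int))) := fun h => pvUkey_ne_vlit (by decide) h.symm
  have h3 : ¬("u3v" = pvUkey (3 + 2 * (t : Int))) := fun h => pvNe_u3v _ ha h.symm
  have h4 : ¬("v3v" = pvUkey (3 + 2 * (t : Int))) := fun h => pvUkey_ne_vlit (by decide) h.symm
  have h5 : ¬("u3h" = pvUkey (3 + 2 * (t : Int))) := fun h => pvNe_u3h _ ha h.symm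
  have h6 : ¬("v3h" = pvUkey (3 + 2 * (t : Int))) := fun h => pvUkey_ne_vlit (by decide) h.symm
  have hmid : ∀ i ∈ pvInner K, pvRowFil K (pvUkey (3 + 2 * (t : Int))) i
      = (pvInner K).flatMap (fun j =>
          if pvLo ((K : Int) - 1 - (t : Int)) < ((K : Int) - i) ^ 2 + ((K : Int) - j) ^ 2 ∧
              ((K : Int) - i) ^ 2 + ((K : Int) - j) ^ 2 ≤ pvHi ((K : Int) - 1 - (t : Int))
          then [i] else []) := by
    intro i hi
    have hmid2 : ∀ j ∈ pvInner K, pvG K (pvUkey (3 + 2 * (t : Int))) i j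
        = if pvLo ((K : Int) - 1 - (t : Int)) < ((K : Int) - i) ^ 2 + ((K : Int) - j) ^ 2 ∧
              ((K : Int) - i) ^ 2 + ((K : Int) - j) ^ 2 ≤ pvHi ((K : Int) - 1 - (t : Int))
          then [i] else [] := fun j hj =>
      pvG_ii_u t ht (pvMem_inner K i hi) (pvMem_inner K j hj)
    rw [pvRow_inner K hK _ i (pvMem_inner K i hi), List.flatMap_congr hmid2]
    simp only [if_neg h5, if_neg h6, List.nil_append, List.append_nil]
  rw [pvFil_split K hK, pvRow_border K hK _ 0 (Or.inl rfl), pvRow_border K hK _ _ (Or.inr rfl),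
    List.flatMap_congr hmid]
  simp only [if_neg h1, if_neg h2, if_neg h3, if_neg h4, List.nil_append, List.append_nil,
    pvFlatMap_nil, List.flatMap_nil]
  rw [pvBU, pvBCells, List.map_flatMap]
  apply List.flatMap_congr
  intro i _
  rw [List.map_filterMap, List.filterMap_eq_flatMap_toList]
  apply List.flatMap_congr
  intro j _
  by_cases hc : pvLo ((K : Int) - 1 - (t : Int)) < ((K : Int) - i) ^ 2 + ((K : Int) - j) ^ 2 ∧
      ((K : Int) - i) ^ 2 + ((K : Int) - j) ^ 2 ≤ pvHi ((K : Int) - 1 - (t : Int))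
  · rw [if_pos hc, if_pos hc]
    rfl
  · rw [if_neg hc, if_neg hc]
    rfl

theorem pvVL_label_v (K t : Nat) (hK : 1 ≤ K) (ht : t < K) :
    ((pvAllApps K).filter (fun p => p.1 == pvVkey (3 + 2 * (t : Int)))).map (fun p => p.2)
      = pvBV K t := by
  have ha : (0 : Int) ≤ 3 + 2 * (t : Int) := by omega
  have h1 : ¬("u3hv" = pvVkey (3 + 2 * (t : Int))) := fun h => pvVkey_ne_ulit (by decide) h.symm
  have h2 : ¬("v3hv" = pvVkey (3 + 2 * (t : Int))) := fun h => pvNe_v3hv _ ha h.symm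
  have h3 : ¬("u3v" = pvVkey (3 + 2 * (t : Int))) := fun h => pvVkey_ne_ulit (by decide) h.symm
  have h4 : ¬("v3v" = pvVkey (3 + 2 * (t : Int))) := fun h => pvNe_v3v _ ha h.symm
  have h5 : ¬("u3h" = pvVkey (3 + 2 * (t : Int))) := fun h => pvVkey_ne_ulit (by decide) h.symm
  have h6 : ¬("v3h" = pvVkey (3 + 2 * (t : Int))) := fun h => pvNe_v3h _ ha h.symm
  have hmid : ∀ i ∈ pvInner K, pvRowFil K (pvVkey (3 + 2 * (t : Int))) i
      = (pvInner K).flatMap (fun j =>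
          if pvLo ((K : Int) - 1 - (t : Int)) < ((K : Int) - i) ^ 2 + ((K : Int) - j) ^ 2 ∧
              ((K : Int) - i) ^ 2 + ((K : Int) - j) ^ 2 ≤ pvHi ((K : Int) - 1 - (t : Int))
          then [j] else []) := by
    intro i hi
    have hmid2 : ∀ j ∈ pvInner K, pvG K (pvVkey (3 + 2 * (t : Int))) i j
        = if pvLo ((K : Int) - 1 - (t : Int)) < ((K : Int) - i) ^ 2 + ((K : Int) - j) ^ 2 ∧
              ((K : Int) - i) ^ 2 + ((K : Int) - j) ^ 2 ≤ pvHi ((K : Int) - 1 - (t : Int))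
          then [j] else [] := fun j hj =>
      pvG_ii_v t ht (pvMem_inner K i hi) (pvMem_inner K j hj)
    rw [pvRow_inner K hK _ i (pvMem_inner K i hi), List.flatMap_congr hmid2]
    simp only [if_neg h5, if_neg h6, List.nil_append, List.append_nil]
  rw [pvFil_split K hK, pvRow_border K hK _ 0 (Or.inl rfl), pvRow_border K hK _ _ (Or.inr rfl),
    List.flatMap_congr hmid]
  simp only [if_neg h1, if_neg h2, if_neg h3, if_neg h4, List.nil_append, List.append_nil,
    pvFlatMap_nil, List.flatMap_nil]
  rw [pvBV, pvBCells, List.map_flatMap]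
  apply List.flatMap_congr
  intro i _
  rw [List.map_filterMap, List.filterMap_eq_flatMap_toList]
  apply List.flatMap_congr
  intro j _
  by_cases hc : pvLo ((K : Int) - 1 - (t : Int)) < ((K : Int) - i) ^ 2 + ((K : Int) - j) ^ 2 ∧
      ((K : Int) - i) ^ 2 + ((K : Int) - j) ^ 2 ≤ pvHi ((K : Int) - 1 - (t : Int))
  · rw [if_pos hc, if_pos hc]
    rfl
  · rw [if_neg hc, if_neg hc]
    rfl

theorem pv_easy_case (n : Int) (h : n ≤ 0) : uv_list_by_n n = uv_list_by_n_alt n := by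
  unfold uv_list_by_n uv_list_by_n_alt
  have h1 : PySem.List.pyRange 3 (n + 1) 2 = [] := by
    rw [PySem.List.pyRange_of_pos _ _ (by norm_num), if_neg (by omega)]; simp
  have h2 : PySem.List.pyRange 0 n 1 = [] := PySem.List.pyRange_one_eq_nil (by omega)
  rw [h1, h2, if_pos (by omega)]
  rfl

theorem pv_main_case (K : Nat) (h : 1 ≤ K) :
    uv_list_by_n (2 * K + 1) = uv_list_by_n_alt (2 * K + 1) := by
  rw [pvA_eq K h, pvB_eq K h]
  rw [pvInitItems, pvFinalItems, List.map_append, List.map_flatMap]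
  congr 1
  · simp only [pvBase6, pvBase6Vals, List.map_cons, List.map_nil]
    rw [pvVL_u3h K h, pvVL_v3h K h, pvVL_u3v K h, pvVL_v3v K h, pvVL_u3hv K h, pvVL_v3hv K h]
    simp
  · apply List.flatMap_congr
    intro t htm
    have ht := List.mem_range.1 htm
    simp only [List.map_cons, List.map_nil]
    rw [pvVL_label_u K t h ht, pvVL_label_v K t h ht]

-- ===== VERDICT =====
theorem uv_list_by_n_spec : Claim_equal_uv_list_by_n := by
  intro n _ hpre
  unfold Spec_uv_list_by_n
  rcases hpre with h | ⟨h3, hodd⟩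
  · exact pv_easy_case n h
  · have h2 : PySem.Int.mod n 2 = n % 2 := PySem.Int.mod_eq_emod_of_pos (by omega)
    have hK : n = 2 * ((n - 1) / 2).toNat + 1 := by omega
    rw [hK]
    exact pv_main_case _ (by omega)
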